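-- pv_equiv track=rewrite | github.com/AnEvilBurrito/ode-biomarker-project | thesis-notebooks/result2/sub-section4/outlier_analysis_mrmr_benchmark.py | parse_model_name_from_condition
-- ===== SOURCE A (Python) =====
-- def parse_model_name_from_condition(condition):
--     """Parse complete model name from condition column format"""
--     parts = condition.split('_')
--     model_parts = []
--     for part in parts:
--         if part.startswith('k'):
--             break
--         model_parts.append(part)
--     complete_model_name = '_'.join(model_parts)
--     return complete_model_name
-- ===== SOURCE B (Python) =====
-- def parse_model_name_from_condition(condition):
--     """Parse complete model name from condition column format"""
--     if condition.startswith('k'):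
--         return ''
--     i = condition.find('_k')
--     return condition if i == -1 else condition[:i]
-- ===== Notes on version B (the rewrite author's own statement) =====
-- stated objective: simpler
-- what changed: B drops A's split-into-parts list, break-loop and join entirely: it checks a leading 'k' and otherwise cuts the raw string at its first '_k' occurrence with a single find + slice.
import Mathlib
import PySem

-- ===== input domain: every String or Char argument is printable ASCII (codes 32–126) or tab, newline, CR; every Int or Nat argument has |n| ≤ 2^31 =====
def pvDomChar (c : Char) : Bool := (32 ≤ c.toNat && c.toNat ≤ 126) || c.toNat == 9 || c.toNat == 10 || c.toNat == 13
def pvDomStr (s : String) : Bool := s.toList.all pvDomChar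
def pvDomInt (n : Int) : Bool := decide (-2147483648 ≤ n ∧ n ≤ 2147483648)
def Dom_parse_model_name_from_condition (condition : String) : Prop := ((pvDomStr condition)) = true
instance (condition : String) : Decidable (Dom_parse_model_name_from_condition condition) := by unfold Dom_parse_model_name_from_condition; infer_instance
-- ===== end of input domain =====

-- B replaces A's split-into-parts + accumulate loop + join by a direct substring scan:
-- cut the raw string at its first "_k" occurrence (objective: simpler; same cost).

-- ===== PORT A =====
-- the 'for part in parts: if part.startswith('k'): break; model_parts.append(part)' loop
def pvLoopA : List (List Char) → List (List Char) → List (List Char)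
  | [], acc => acc.reverse
  | p :: ps, acc =>
      if PySem.Chars.startswith p ['k'] then acc.reverse else pvLoopA ps (p :: acc)

def parse_model_name_from_condition (condition : String) : String :=
  let parts := PySem.Chars.splitOn condition.toList ['_']
  String.ofList (PySem.Chars.join ['_'] (pvLoopA parts []))

-- ===== PORT B =====
-- Source B: startswith('k') check, condition.find('_k'), then the slice condition[:i]
def parse_model_name_from_condition_alt (condition : String) : String :=
  if PySem.Str.startswith condition "k" then ""
  else
    let i := PySem.Str.find condition "_k"
    if i = -1 then condition else PySem.Str.slice condition none (some i)

-- ===== PRECONDITION & SPEC =====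
def Spec_parse_model_name_from_condition (condition : String) (out : String) : Prop := out = parse_model_name_from_condition_alt condition
instance (condition : String) (out : String) : Decidable (Spec_parse_model_name_from_condition condition out) := by unfold Spec_parse_model_name_from_condition; infer_instance

-- ===== CLAIM (what is proved, stated in full; the proofs are below) =====
def Claim_equal_parse_model_name_from_condition : Prop := ∀ (condition : String), Dom_parse_model_name_from_condition condition → Spec_parse_model_name_from_condition condition (parse_model_name_from_condition condition)

-- ===== LEMMAS AND PROOFS =====

-- structural (fuel-free) version of split('_'), for reasoning only
def pvSplit (l : List Char) : List (List Char) :=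
  match _h : l.dropWhile (· ≠ '_') with
  | [] => [l.takeWhile (· ≠ '_')]
  | _ :: r => l.takeWhile (· ≠ '_') :: pvSplit r
termination_by l.length
decreasing_by
  have := List.length_dropWhile_le (fun c => decide (c ≠ '_')) l
  simp only [_h, List.length_cons] at this
  omega

-- intermediate form of the result: recursive cut of the raw string at its first '_'
def pvAltGo (l : List Char) : List Char :=
  if l.head? = some 'k' then []
  else
    match _h : l.dropWhile (· ≠ '_') with
    | [] => l
    | _ :: r =>
        if r.head? = some 'k' then l.takeWhile (· ≠ '_')
        else l.takeWhile (· ≠ '_') ++ '_' :: pvAltGo r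
termination_by l.length
decreasing_by
  have := List.length_dropWhile_le (fun c => decide (c ≠ '_')) l
  simp only [_h, List.length_cons] at this
  omega

lemma pvSplit_of_nil (l : List Char) (h : l.dropWhile (· ≠ '_') = []) :
    pvSplit l = [l.takeWhile (· ≠ '_')] := by
  rw [pvSplit]
  split
  · rfl
  · next heq => rw [h] at heq; exact absurd heq (by simp)

lemma pvSplit_of_cons (l : List Char) (d : Char) (r : List Char)
    (h : l.dropWhile (· ≠ '_') = d :: r) :
    pvSplit l = l.takeWhile (· ≠ '_') :: pvSplit r := by
  rw [pvSplit]
  split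
  · next heq => rw [h] at heq; exact absurd heq (by simp)
  · next e s heq =>
      rw [h] at heq
      obtain ⟨rfl, rfl⟩ : e = d ∧ s = r := by simpa using heq.symm
      rfl

lemma pvSplit_ne_nil (l : List Char) : pvSplit l ≠ [] := by
  cases h : l.dropWhile (· ≠ '_') with
  | nil => rw [pvSplit_of_nil l h]; simp
  | cons d r => rw [pvSplit_of_cons l d r h]; simp

-- the break-loop with its accumulator discharged
def pvUntilK : List (List Char) → List (List Char)
  | [] => []
  | p :: ps => if PySem.Chars.startswith p ['k'] then [] else p :: pvUntilK ps

lemma pvLoopA_eq (ps acc : List (List Char)) :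
    pvLoopA ps acc = acc.reverse ++ pvUntilK ps := by
  induction ps generalizing acc with
  | nil => simp [pvLoopA, pvUntilK]
  | cons p ps ih =>
      simp only [pvLoopA, pvUntilK]
      split <;> simp [ih]

def pvPrependFirst (x : List Char) : List (List Char) → List (List Char)
  | [] => [x]
  | y :: ys => (x ++ y) :: ys

lemma pvGo_eq (fuel : Nat) (l cur : List Char) (acc : List (List Char))
    (hf : l.length < fuel) :
    PySem.Chars.splitOn.go ['_'] fuel l cur acc
      = acc.reverse ++ pvPrependFirst cur.reverse (pvSplit l) := by
  induction fuel generalizing l cur acc with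
  | zero => omega
  | succ f ih =>
      match l with
      | [] =>
          rw [pvSplit_of_nil [] (by simp)]
          simp [PySem.Chars.splitOn.go, pvPrependFirst]
      | c :: rest =>
          by_cases hc : c = '_'
          · subst hc
            have hpre : List.isPrefixOf ['_'] ('_' :: rest) = true := by
              simp [List.isPrefixOf]
            rw [show PySem.Chars.splitOn.go ['_'] (f+1) ('_' :: rest) cur acc
                  = PySem.Chars.splitOn.go ['_'] f (List.drop 1 ('_' :: rest)) []
                      (cur.reverse :: acc) by
                simp [PySem.Chars.splitOn.go, hpre]]
            simp only [List.drop_succ_cons, List.drop_zero]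
            rw [ih rest [] (cur.reverse :: acc) (by simpa using Nat.lt_of_succ_lt_succ hf)]
            rw [pvSplit_of_cons ('_' :: rest) '_' rest (by simp)]
            obtain ⟨q, qs, hq⟩ : ∃ q qs, pvSplit rest = q :: qs := by
              cases hh : pvSplit rest with
              | nil => exact absurd hh (pvSplit_ne_nil rest)
              | cons q qs => exact ⟨q, qs, rfl⟩
            simp [hq, pvPrependFirst]
          · have hpre : List.isPrefixOf ['_'] (c :: rest) = false := by
              simp [List.isPrefixOf]
              exact fun h => absurd h.symm hc
            rw [show PySem.Chars.splitOn.go ['_'] (f+1) (c :: rest) cur acc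
                  = PySem.Chars.splitOn.go ['_'] f rest (c :: cur) acc by
                simp [PySem.Chars.splitOn.go, hpre]]
            rw [ih rest (c :: cur) acc (by simpa using Nat.lt_of_succ_lt_succ hf)]
            have htk : pvSplit (c :: rest) = pvPrependFirst [c] (pvSplit rest) := by
              cases hh : List.dropWhile (fun x => decide (x ≠ '_')) rest with
              | nil =>
                  rw [pvSplit_of_nil rest hh,
                      pvSplit_of_nil (c :: rest) (by simpa [hc] using hh)]
                  simp [hc, pvPrependFirst]
              | cons d r =>
                  rw [pvSplit_of_cons rest d r hh,
                      pvSplit_of_cons (c :: rest) d r (by simpa [hc] using hh)]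
                  simp [hc, pvPrependFirst]
            rw [htk]
            obtain ⟨q, qs, hq⟩ : ∃ q qs, pvSplit rest = q :: qs := by
              cases hh : pvSplit rest with
              | nil => exact absurd hh (pvSplit_ne_nil rest)
              | cons q qs => exact ⟨q, qs, rfl⟩
            simp [hq, pvPrependFirst]

lemma pvSplitOn_eq (l : List Char) :
    PySem.Chars.splitOn l ['_'] = pvSplit l := by
  unfold PySem.Chars.splitOn
  rw [pvGo_eq (l.length + 1) l [] [] (Nat.lt_succ_self _)]
  obtain ⟨q, qs, hq⟩ : ∃ q qs, pvSplit l = q :: qs := by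
    cases hh : pvSplit l with
    | nil => exact absurd hh (pvSplit_ne_nil l)
    | cons q qs => exact ⟨q, qs, rfl⟩
  simp [hq, pvPrependFirst]

-- the head part starts with 'k' exactly when the whole string does
lemma pvStartswith_takeWhile (l : List Char) :
    PySem.Chars.startswith (l.takeWhile (· ≠ '_')) ['k'] = (l.head? == some 'k') := by
  cases l with
  | nil => simp [PySem.Chars.startswith]
  | cons c rest =>
      by_cases hc : c = '_'
      · subst hc
        simp [PySem.Chars.startswith]
      · simp [hc, PySem.Chars.startswith, List.isPrefixOf, eq_comm]

lemma pvUntilK_pvSplit_eq_nil_iff (l : List Char) :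
    pvUntilK (pvSplit l) = [] ↔ l.head? = some 'k' := by
  cases hdw : l.dropWhile (· ≠ '_') with
  | nil =>
      rw [pvSplit_of_nil l hdw]
      simp only [pvUntilK, pvStartswith_takeWhile]
      by_cases hk : l.head? = some 'k' <;> simp [hk]
  | cons d r =>
      rw [pvSplit_of_cons l d r hdw]
      simp only [pvUntilK, pvStartswith_takeWhile]
      by_cases hk : l.head? = some 'k' <;> simp [hk]

lemma pvTakeWhile_eq_self_of_dropWhile_nil (l : List Char)
    (h : l.dropWhile (· ≠ '_') = []) : l.takeWhile (· ≠ '_') = l := by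
  conv_rhs => rw [← List.takeWhile_append_dropWhile (p := fun c => decide (c ≠ '_')) (l := l)]
  rw [h, List.append_nil]

lemma pvMain (l : List Char) :
    PySem.Chars.join ['_'] (pvUntilK (pvSplit l)) = pvAltGo l := by
  rw [pvAltGo]
  by_cases hk : l.head? = some 'k'
  · rw [(pvUntilK_pvSplit_eq_nil_iff l).mpr hk]
    simp [hk, PySem.Chars.join_nil]
  · have hkb : (l.head? == some 'k') = false := by simpa using hk
    simp only [hk, if_false]
    cases hdw : l.dropWhile (· ≠ '_') with
    | nil =>
        rw [pvSplit_of_nil l hdw]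
        simp only [pvUntilK, pvStartswith_takeWhile, hkb, Bool.false_eq_true, if_false]
        rw [PySem.Chars.join_singleton, pvTakeWhile_eq_self_of_dropWhile_nil l hdw]
    | cons d r =>
        rw [pvSplit_of_cons l d r hdw]
        simp only [pvUntilK, pvStartswith_takeWhile, hkb, Bool.false_eq_true, if_false]
        by_cases hrk : r.head? = some 'k'
        · rw [(pvUntilK_pvSplit_eq_nil_iff r).mpr hrk]
          simp [hrk, PySem.Chars.join_singleton]
        · simp only [hrk, if_false]
          obtain ⟨q, t, hqt⟩ : ∃ q t, pvUntilK (pvSplit r) = q :: t := by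
            cases hh : pvUntilK (pvSplit r) with
            | nil => exact absurd ((pvUntilK_pvSplit_eq_nil_iff r).mp hh) hrk
            | cons q t => exact ⟨q, t, rfl⟩
          rw [hqt, PySem.Chars.join_cons_cons, ← hqt, pvMain r]
          simp
termination_by l.length
decreasing_by
  have := List.length_dropWhile_le (fun c => decide (c ≠ '_')) l
  simp only [hdw, List.length_cons] at this
  omega

-- ===== B side: find('_k') located from the split structure =====

-- find points at the stated first occurrence
lemma pvFind_eq_of_first (l sub : List Char) (k : Nat)
    (hp : sub <+: l.drop k) (hmin : ∀ i < k, ¬ sub <+: l.drop i) :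
    PySem.Chars.find l sub = (k : Int) := by
  have hinf : sub <:+: l :=
    (PySem.Chars.isIn_iff_infix sub l).mp
      ((PySem.Chars.exists_prefix_drop_iff_isIn sub l).mp ⟨k, hp⟩)
  have h0 : 0 ≤ PySem.Chars.find l sub := (PySem.Chars.find_nonneg_iff l sub).mpr hinf
  obtain ⟨hfp, hfmin⟩ := PySem.Chars.find_spec h0
  rcases lt_trichotomy (PySem.Chars.find l sub).toNat k with h | h | h
  · exact absurd hfp (hmin _ h)
  · omega
  · exact absurd hp (hfmin k h)

lemma pvPrefix_head (m : List Char) (h : ['_', 'k'] <+: m) : m.head? = some '_' := by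
  obtain ⟨t, rfl⟩ := h; rfl

-- no "_k" starts inside the '_'-free prefix
lemma pvNoMatch_lt (tw rest : List Char) (htw : ∀ c ∈ tw, c ≠ '_')
    (i : Nat) (hi : i < tw.length) : ¬ ['_', 'k'] <+: (tw ++ rest).drop i := by
  intro h
  have hh := pvPrefix_head _ h
  rw [List.head?_drop, List.getElem?_append_left hi, List.getElem?_eq_getElem hi] at hh
  exact htw _ (List.getElem_mem hi) (by simpa using hh)

lemma pvDrop_big (tw r : List Char) (i : Nat) :
    (tw ++ '_' :: r).drop (tw.length + 1 + i) = r.drop i := by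
  rw [List.drop_append, List.drop_eq_nil_of_le (by omega),
      show tw.length + 1 + i - tw.length = i + 1 by omega]
  simp

lemma pvTake_big (tw r : List Char) (i : Nat) :
    (tw ++ '_' :: r).take (tw.length + 1 + i) = tw ++ '_' :: r.take i := by
  rw [List.take_append, List.take_of_length_le (by omega),
      show tw.length + 1 + i - tw.length = i + 1 by omega]
  simp

-- the first element dropWhile keeps fails the predicate
lemma pvDropWhile_head_false (p : Char → Bool) (l : List Char) (d : Char) (r : List Char)
    (h : l.dropWhile p = d :: r) : p d = false := by
  have h1 := List.head_dropWhile_not p (l := l) (by simp [h])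
  have h2 : (l.dropWhile p).head (by simp [h]) = d := by simp [h]
  rw [h2] at h1
  simpa using h1

-- the cut the alt port computes, from pvAltGo
lemma pvAltGo_eq_cut : ∀ (n : Nat) (l : List Char), l.length ≤ n → l.head? ≠ some 'k' →
    pvAltGo l = (if PySem.Chars.find l ['_', 'k'] = -1 then l
                 else l.take (PySem.Chars.find l ['_', 'k']).toNat) := by
  intro n
  induction n with
  | zero =>
      intro l hl _
      have : l = [] := by cases l <;> simp_all
      subst this
      simp [pvAltGo, show PySem.Chars.find ([] : List Char) ['_','k'] = -1 from
        (PySem.Chars.find_eq_neg_one_iff _ _).mpr (by intro h; simpa using h.sublist.length_le)]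
  | succ m ih =>
      intro l hl hk
      have htw : ∀ c ∈ l.takeWhile (· ≠ '_'), c ≠ '_' := by
        intro c hc; simpa using List.mem_takeWhile_imp hc
      rw [pvAltGo]
      simp only [hk, if_false]
      cases hdw : l.dropWhile (· ≠ '_') with
      | nil =>
          -- no '_' at all: no "_k" either
          have hno : PySem.Chars.find l ['_', 'k'] = -1 := by
            rw [PySem.Chars.find_eq_neg_one_iff]
            intro hinf
            have h_ : '_' ∈ l := hinf.mem (by simp)
            have := List.dropWhile_eq_nil_iff.mp hdw _ h_
            simp at this
          simp [hno]
      | cons d r =>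
          have hsplit : l = l.takeWhile (· ≠ '_') ++ '_' :: r := by
            conv_lhs => rw [← List.takeWhile_append_dropWhile (p := fun c => decide (c ≠ '_')) (l := l)]
            rw [hdw]
            have hd : d = '_' := by
              have := pvDropWhile_head_false _ _ _ _ hdw
              simpa using this
            rw [hd]
          set tw := l.takeWhile (· ≠ '_') with htwdef
          by_cases hrk : r.head? = some 'k'
          · -- first "_k" is right at the end of tw
            obtain ⟨r', rfl⟩ : ∃ r', r = 'k' :: r' := by
              cases r with
              | nil => simp at hrk
              | cons a b =>
                  have ha : a = 'k' := by simpa using hrk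
                  exact ⟨b, by rw [ha]⟩
            have hfind : PySem.Chars.find l ['_', 'k'] = (tw.length : Int) := by
              apply pvFind_eq_of_first
              · rw [hsplit, List.drop_left]; exact ⟨r', rfl⟩
              · intro i hi; rw [hsplit]; exact pvNoMatch_lt tw _ htw i hi
            rw [hfind]
            have : ((tw.length : Int)) ≠ -1 := by omega
            simp only [hrk, if_true, this, if_false, Int.toNat_natCast]
            conv_rhs => rw [hsplit]
            rw [List.take_left]
          · -- recurse into r
            have hrlen : r.length ≤ m := by
              have := List.length_dropWhile_le (fun c => decide (c ≠ '_')) l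
              rw [hdw] at this; simp at this; omega
            have ihr := ih r hrlen hrk
            by_cases hfr : PySem.Chars.find r ['_', 'k'] = -1
            · -- none in r ⇒ none in l
              have hno : PySem.Chars.find l ['_', 'k'] = -1 := by
                rw [PySem.Chars.find_eq_neg_one_iff]
                intro hinf
                obtain ⟨j, hj⟩ := (PySem.Chars.exists_prefix_drop_iff_isIn ['_','k'] l).mpr
                  ((PySem.Chars.isIn_iff_infix _ _).mpr hinf)
                rcases lt_trichotomy j tw.length with h | h | h
                · exact pvNoMatch_lt tw _ htw j h (hsplit ▸ hj)
                · subst h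
                  rw [hsplit, List.drop_left] at hj
                  obtain ⟨t, ht⟩ := hj
                  simp only [List.cons_append, List.nil_append] at ht
                  injection ht with h1 h2
                  exact hrk (by rw [← h2]; rfl)
                · obtain ⟨i, rfl⟩ : ∃ i, j = tw.length + 1 + i := ⟨j - tw.length - 1, by omega⟩
                  rw [hsplit, pvDrop_big] at hj
                  exact (PySem.Chars.find_eq_neg_one_iff r ['_','k']).mp hfr
                    ((PySem.Chars.isIn_iff_infix _ _).mp
                      ((PySem.Chars.exists_prefix_drop_iff_isIn ['_','k'] r).mp ⟨i, hj⟩))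
              rw [hno] at *
              simp only [hrk, if_false, if_true]
              rw [ihr]
              simp only [hfr, if_true]
              exact hsplit.symm
            · -- first occurrence in r at position fr
              have h0r : 0 ≤ PySem.Chars.find r ['_', 'k'] := by
                have := PySem.Chars.neg_one_le_find r ['_','k']
                omega
              obtain ⟨hrp, hrmin⟩ := PySem.Chars.find_spec h0r
              set fr := (PySem.Chars.find r ['_', 'k']).toNat with hfrdef
              have hfind : PySem.Chars.find l ['_', 'k'] = ((tw.length + 1 + fr : Nat) : Int) := by
                apply pvFind_eq_of_first
                · rw [hsplit, pvDrop_big]; exact hrp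
                · intro i hi
                  rcases lt_trichotomy i tw.length with h | h | h
                  · rw [hsplit]; exact pvNoMatch_lt tw _ htw i h
                  · subst h
                    rw [hsplit, List.drop_left]
                    intro hpre
                    obtain ⟨t, ht⟩ := hpre
                    simp only [List.cons_append, List.nil_append] at ht
                    injection ht with h1 h2
                    exact hrk (by rw [← h2]; rfl)
                  · obtain ⟨i', rfl⟩ : ∃ i', i = tw.length + 1 + i' := ⟨i - tw.length - 1, by omega⟩
                    rw [hsplit, pvDrop_big]
                    exact hrmin i' (by omega)
              rw [hfind]
              have : (((tw.length + 1 + fr : Nat) : Int)) ≠ -1 := by omega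
              simp only [hrk, if_false, this, Int.toNat_natCast]
              rw [ihr]
              simp only [hfr, if_false]
              conv_rhs => rw [hsplit, pvTake_big]

-- startswith ['k'] is a head test
lemma pvStartswith_k (l : List Char) :
    PySem.Chars.startswith l ['k'] = (l.head? == some 'k') := by
  cases l with
  | nil => simp [PySem.Chars.startswith]
  | cons c rest => simp [PySem.Chars.startswith, List.isPrefixOf, eq_comm]

-- ===== VERDICT (by name: the statement is the Claim_ definition above) =====
theorem parse_model_name_from_condition_spec : Claim_equal_parse_model_name_from_condition := by
  intro condition _
  unfold Spec_parse_model_name_from_condition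
  unfold parse_model_name_from_condition parse_model_name_from_condition_alt
  simp only [pvSplitOn_eq, pvLoopA_eq, List.reverse_nil, List.nil_append, pvMain,
    PySem.Str.startswith_eq, show ("k" : String).toList = ['k'] from rfl, pvStartswith_k]
  by_cases hk : condition.toList.head? = some 'k'
  · simp only [hk, beq_self_eq_true, if_true]
    rw [pvAltGo]
    simp only [hk, if_true]
  · have hkb : (condition.toList.head? == some 'k') = false := by simpa using hk
    simp only [hkb, Bool.false_eq_true, if_false]
    rw [pvAltGo_eq_cut condition.toList.length condition.toList le_rfl hk]
    rw [PySem.Str.find_eq, show ("_k" : String).toList = ['_', 'k'] from rfl]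
    by_cases hf : PySem.Chars.find condition.toList ['_', 'k'] = -1
    · simp [hf]
    · simp only [hf, if_false]
      have h0 : 0 ≤ PySem.Chars.find condition.toList ['_', 'k'] := by
        have := PySem.Chars.neg_one_le_find condition.toList ['_', 'k']
        omega
      apply String.toList_inj.mp
      rw [PySem.Str.toList_slice]
      rw [show PySem.Chars.find condition.toList ['_', 'k']
            = ((PySem.Chars.find condition.toList ['_', 'k']).toNat : Int) by omega]
      simp [pysem]
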